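-- pv_equiv track=rewrite | github.com/rockban31/mist-infra-manager | src/report_generator.py | _sort_insights_by_priority
-- ===== SOURCE A (Python) =====
-- from typing import Dict, List, Optional
--
-- def _sort_insights_by_priority(insights: List[Dict]) -> Dict[str, List[Dict]]:
--     """Sort insights by priority (severity) level."""
--     severity_priority = {
--         'critical': 0,
--         'major': 1,
--         'warning': 2,
--         'info': 3
--     }
--
--     sorted_by_priority = {
--         'critical': [],
--         'major': [],
--         'warning': [],
--         'info': []
--     }
--
--     for insight in insights:
--         severity = insight.get('severity', 'info').lower()
--         if severity in sorted_by_priority: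
--             sorted_by_priority[severity].append(insight)
--
--     # Sort within each priority level
--     for severity in sorted_by_priority:
--         sorted_by_priority[severity].sort(key=lambda x: x.get('title', ''))
--
--     return sorted_by_priority
-- ===== SOURCE B (Python) =====
-- from typing import Dict, List, Optional
--
-- def _sort_insights_by_priority(insights: List[Dict]) -> Dict[str, List[Dict]]:
--     """Sort insights by priority (severity) level."""
--     ordered = sorted(insights, key=lambda x: x.get('title', ''))
--     return {
--         severity: [i for i in ordered
--                    if i.get('severity', 'info').lower() == severity]
--         for severity in ('critical', 'major', 'warning', 'info')
--     }
-- ===== Notes on version B (the rewrite author's own statement) =====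
-- stated objective: alternative
-- what changed: Replaces mutate-a-dict-of-buckets followed by four in-place per-bucket sorts with one global stable sort by title followed by a dict comprehension that filters each severity bucket out of the sorted list (stability preserves tie order).
import Mathlib
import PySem

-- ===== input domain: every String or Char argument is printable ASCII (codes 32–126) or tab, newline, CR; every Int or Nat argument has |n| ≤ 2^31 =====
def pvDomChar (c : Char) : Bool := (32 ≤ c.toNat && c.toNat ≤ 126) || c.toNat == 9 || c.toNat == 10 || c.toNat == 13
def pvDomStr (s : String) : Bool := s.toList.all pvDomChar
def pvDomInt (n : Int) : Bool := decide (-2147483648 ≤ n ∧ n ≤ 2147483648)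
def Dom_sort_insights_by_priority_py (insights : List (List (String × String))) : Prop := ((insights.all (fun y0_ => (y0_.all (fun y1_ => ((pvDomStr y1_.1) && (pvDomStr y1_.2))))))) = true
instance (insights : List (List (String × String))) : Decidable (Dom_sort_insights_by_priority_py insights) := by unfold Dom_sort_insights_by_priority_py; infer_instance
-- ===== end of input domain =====

-- B replaces A's bucket-into-a-dict-then-sort-each-bucket with one global stable sort by
-- title followed by a per-severity filter (same return value; neither mutates its input).

-- shared field accessors (both Pythons read the same dict fields the same way)
def pvTitleKey (x : List (String × String)) : String :=
  (PySem.Dict.mk x).getD "title" ""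

def pvSevOf (x : List (String × String)) : String :=
  PySem.Str.lower ((PySem.Dict.mk x).getD "severity" "info")

-- ===== PORT A =====
def pvInitA : PySem.Dict String (List (List (String × String))) :=
  ((((PySem.Dict.empty : PySem.Dict String (List (List (String × String)))).insert
      "critical" []).insert "major" []).insert "warning" []).insert "info" []

def pvStepA (d : PySem.Dict String (List (List (String × String))))
    (insight : List (String × String)) : PySem.Dict String (List (List (String × String))) :=
  let severity := pvSevOf insight
  if d.contains severity then d.modify severity [] (fun l => l ++ [insight]) else d

def sort_insights_by_priority_py (insights : List (List (String × String))) :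
    List (String × List (List (String × String))) :=
  let d1 := insights.foldl pvStepA pvInitA
  let d2 := d1.keys.foldl
      (fun d severity => d.modify severity [] (fun l => PySem.List.sorted l pvTitleKey false)) d1
  d2.items

-- ===== PORT B =====
def sort_insights_by_priority_py_alt (insights : List (List (String × String))) :
    List (String × List (List (String × String))) :=
  let ordered := PySem.List.sorted insights pvTitleKey false
  ["critical", "major", "warning", "info"].map
    (fun severity => (severity, ordered.filter (fun i => pvSevOf i == severity)))

-- ===== PRECONDITION & SPEC =====
def Spec_sort_insights_by_priority_py (insights : List (List (String × String))) (out : List (String × List (List (String × String)))) : Prop := out = sort_insights_by_priority_py_alt insights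
instance (insights : List (List (String × String))) (out : List (String × List (List (String × String)))) : Decidable (Spec_sort_insights_by_priority_py insights out) := by unfold Spec_sort_insights_by_priority_py; infer_instance

-- ===== CLAIM (what is proved, stated in full; the proofs are below) =====
def Claim_equal_sort_insights_by_priority_py : Prop := ∀ (insights : List (List (String × String))), Dom_sort_insights_by_priority_py insights → Spec_sort_insights_by_priority_py insights (sort_insights_by_priority_py insights)

-- ===== LEMMAS AND PROOFS =====

-- the four-bucket dict A maintains, with the buckets as parameters
def pvMkD (a b c d : List (List (String × String))) :
    PySem.Dict String (List (List (String × String))) :=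
  PySem.Dict.mk [("critical", a), ("major", b), ("warning", c), ("info", d)]

lemma pvInitA_eq : pvInitA = pvMkD [] [] [] [] := by decide

lemma pvStepA_crit (a b c d : List (List (String × String))) (x : List (String × String))
    (h : pvSevOf x = "critical") : pvStepA (pvMkD a b c d) x = pvMkD (a ++ [x]) b c d := by
  simp [pvStepA, pvMkD, h, PySem.Dict.contains, PySem.Dict.modify, PySem.Dict.insert,
    PySem.Dict.getD, PySem.Dict.get?, PySem.Dict.items]

lemma pvStepA_major (a b c d : List (List (String × String))) (x : List (String × String))
    (h : pvSevOf x = "major") : pvStepA (pvMkD a b c d) x = pvMkD a (b ++ [x]) c d := by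
  simp [pvStepA, pvMkD, h, PySem.Dict.contains, PySem.Dict.modify, PySem.Dict.insert,
    PySem.Dict.getD, PySem.Dict.get?, PySem.Dict.items]

lemma pvStepA_warn (a b c d : List (List (String × String))) (x : List (String × String))
    (h : pvSevOf x = "warning") : pvStepA (pvMkD a b c d) x = pvMkD a b (c ++ [x]) d := by
  simp [pvStepA, pvMkD, h, PySem.Dict.contains, PySem.Dict.modify, PySem.Dict.insert,
    PySem.Dict.getD, PySem.Dict.get?, PySem.Dict.items]

lemma pvStepA_info (a b c d : List (List (String × String))) (x : List (String × String))
    (h : pvSevOf x = "info") : pvStepA (pvMkD a b c d) x = pvMkD a b c (d ++ [x]) := by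
  simp [pvStepA, pvMkD, h, PySem.Dict.contains, PySem.Dict.modify, PySem.Dict.insert,
    PySem.Dict.getD, PySem.Dict.get?, PySem.Dict.items]

lemma pvStepA_none (a b c d : List (List (String × String))) (x : List (String × String))
    (h1 : pvSevOf x ≠ "critical") (h2 : pvSevOf x ≠ "major")
    (h3 : pvSevOf x ≠ "warning") (h4 : pvSevOf x ≠ "info") :
    pvStepA (pvMkD a b c d) x = pvMkD a b c d := by
  have g1 : (("critical" : String) == pvSevOf x) = false := beq_eq_false_iff_ne.mpr (Ne.symm h1)
  have g2 : (("major" : String) == pvSevOf x) = false := beq_eq_false_iff_ne.mpr (Ne.symm h2)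
  have g3 : (("warning" : String) == pvSevOf x) = false := beq_eq_false_iff_ne.mpr (Ne.symm h3)
  have g4 : (("info" : String) == pvSevOf x) = false := beq_eq_false_iff_ne.mpr (Ne.symm h4)
  simp [pvStepA, pvMkD, PySem.Dict.contains, PySem.Dict.items, g1, g2, g3, g4]

lemma pvFoldA (xs : List (List (String × String))) :
    ∀ a b c d, xs.foldl pvStepA (pvMkD a b c d) =
      pvMkD (a ++ xs.filter (fun i => pvSevOf i == "critical"))
            (b ++ xs.filter (fun i => pvSevOf i == "major"))
            (c ++ xs.filter (fun i => pvSevOf i == "warning"))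
            (d ++ xs.filter (fun i => pvSevOf i == "info")) := by
  induction xs with
  | nil => intro a b c d; simp
  | cons x t ih =>
    intro a b c d
    by_cases h1 : pvSevOf x = "critical"
    · rw [List.foldl_cons, pvStepA_crit a b c d x h1, ih]
      simp [List.filter_cons, h1]
    · by_cases h2 : pvSevOf x = "major"
      · rw [List.foldl_cons, pvStepA_major a b c d x h2, ih]
        simp [List.filter_cons, h2]
      · by_cases h3 : pvSevOf x = "warning"
        · rw [List.foldl_cons, pvStepA_warn a b c d x h3, ih]
          simp [List.filter_cons, h3]
        · by_cases h4 : pvSevOf x = "info"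
          · rw [List.foldl_cons, pvStepA_info a b c d x h4, ih]
            simp [List.filter_cons, h4]
          · rw [List.foldl_cons, pvStepA_none a b c d x h1 h2 h3 h4, ih]
            simp [List.filter_cons, h1, h2, h3, h4]

lemma pvKeys_mkD (a b c d : List (List (String × String))) :
    (pvMkD a b c d).keys = ["critical", "major", "warning", "info"] := by
  simp [pvMkD, PySem.Dict.keys, PySem.Dict.items]

lemma pvModify_crit (a b c d : List (List (String × String)))
    (f : List (List (String × String)) → List (List (String × String))) :
    (pvMkD a b c d).modify "critical" [] f = pvMkD (f a) b c d := by
  simp [pvMkD, PySem.Dict.modify, PySem.Dict.insert, PySem.Dict.contains,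
    PySem.Dict.getD, PySem.Dict.get?, PySem.Dict.items]

lemma pvModify_major (a b c d : List (List (String × String)))
    (f : List (List (String × String)) → List (List (String × String))) :
    (pvMkD a b c d).modify "major" [] f = pvMkD a (f b) c d := by
  simp [pvMkD, PySem.Dict.modify, PySem.Dict.insert, PySem.Dict.contains,
    PySem.Dict.getD, PySem.Dict.get?, PySem.Dict.items]

lemma pvModify_warn (a b c d : List (List (String × String)))
    (f : List (List (String × String)) → List (List (String × String))) :
    (pvMkD a b c d).modify "warning" [] f = pvMkD a b (f c) d := by
  simp [pvMkD, PySem.Dict.modify, PySem.Dict.insert, PySem.Dict.contains,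
    PySem.Dict.getD, PySem.Dict.get?, PySem.Dict.items]

lemma pvModify_info (a b c d : List (List (String × String)))
    (f : List (List (String × String)) → List (List (String × String))) :
    (pvMkD a b c d).modify "info" [] f = pvMkD a b c (f d) := by
  simp [pvMkD, PySem.Dict.modify, PySem.Dict.insert, PySem.Dict.contains,
    PySem.Dict.getD, PySem.Dict.get?, PySem.Dict.items]

-- === stability: filtering commutes with the stable insertion sort ===

lemma pvInsertBy_cons {α : Type} (bf : α → α → Bool) (x y : α) (t : List α) :
    PySem.List.insertBy bf x (y :: t) =
      if bf x y then x :: y :: t else y :: PySem.List.insertBy bf x t := rfl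

lemma pvInsertBy_cons_lt {α : Type} (key : α → String) (x y : α) (t : List α)
    (h : key x < key y) :
    PySem.List.insertBy (fun a b => decide (key a < key b)) x (y :: t) = x :: y :: t := by
  rw [pvInsertBy_cons, decide_eq_true h, if_pos rfl]

lemma pvInsertBy_cons_ge {α : Type} (key : α → String) (x y : α) (t : List α)
    (h : ¬ key x < key y) :
    PySem.List.insertBy (fun a b => decide (key a < key b)) x (y :: t) =
      y :: PySem.List.insertBy (fun a b => decide (key a < key b)) x t := by
  rw [pvInsertBy_cons, decide_eq_false h, if_neg (by simp)]

lemma pvInsertBy_head_lt {α : Type} (key : α → String) (x : α) (l : List α)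
    (h : ∀ z ∈ l, key x < key z) :
    PySem.List.insertBy (fun a b => decide (key a < key b)) x l = x :: l := by
  cases l with
  | nil => rfl
  | cons y t => exact pvInsertBy_cons_lt key x y t (h y (by simp))

lemma pvFilter_insertBy {α : Type} (key : α → String) (p : α → Bool) (x : α) :
    ∀ l : List α, l.Pairwise (fun a b => key a ≤ key b) →
    (PySem.List.insertBy (fun a b => decide (key a < key b)) x l).filter p =
      if p x then PySem.List.insertBy (fun a b => decide (key a < key b)) x (l.filter p)
      else l.filter p := by
  intro l
  induction l with
  | nil =>
    intro _
    cases hpx : p x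
    · rw [if_neg (by simp [hpx])]
      show List.filter p [x] = _
      rw [List.filter_cons_of_neg (by simp [hpx]), List.filter_nil]
    · rw [if_pos (by simp [hpx])]
      show List.filter p [x] = _
      rw [List.filter_cons_of_pos (by simp [hpx]), List.filter_nil]
      rfl
  | cons y t ih =>
    intro hpw
    obtain ⟨hy, ht⟩ := List.pairwise_cons.mp hpw
    by_cases hlt : key x < key y
    · rw [pvInsertBy_cons_lt key x y t hlt]
      cases hpx : p x
      · rw [if_neg (by simp [hpx]), List.filter_cons_of_neg (by simp [hpx])]
      · rw [if_pos (by simp [hpx]), List.filter_cons_of_pos (by simp [hpx])]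
        refine (pvInsertBy_head_lt key x _ (fun z hz => ?_)).symm
        rcases List.mem_cons.mp (List.mem_of_mem_filter hz) with h | h
        · exact h ▸ hlt
        · exact lt_of_lt_of_le hlt (hy z h)
    · rw [pvInsertBy_cons_ge key x y t hlt]
      cases hpy : p y
      · rw [List.filter_cons_of_neg (by simp [hpy]), List.filter_cons_of_neg (by simp [hpy])]
        exact ih ht
      · rw [List.filter_cons_of_pos (by simp [hpy]), List.filter_cons_of_pos (by simp [hpy]),
          ih ht]
        cases hpx : p x
        · rw [if_neg (by simp [hpx]), if_neg (by simp [hpx])]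
        · rw [if_pos (by simp [hpx]), if_pos (by simp [hpx]),
            pvInsertBy_cons_ge key x y (t.filter p) hlt]

lemma pvSorted_append_singleton (t : List (List (String × String)))
    (x : List (String × String)) :
    PySem.List.sorted (t ++ [x]) pvTitleKey false =
      PySem.List.insertBy (fun a b => decide (pvTitleKey a < pvTitleKey b)) x
        (PySem.List.sorted t pvTitleKey false) := by
  rw [PySem.List.sorted_eq_foldl_insertBy, PySem.List.sorted_eq_foldl_insertBy,
    List.foldl_append]
  rfl

lemma pvFilter_sorted (p : List (String × String) → Bool)
    (xs : List (List (String × String))) :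
    (PySem.List.sorted xs pvTitleKey false).filter p =
      PySem.List.sorted (xs.filter p) pvTitleKey false := by
  induction xs using List.reverseRecOn with
  | nil => rfl
  | append_singleton t x ih =>
    rw [pvSorted_append_singleton,
      pvFilter_insertBy pvTitleKey p x _ (PySem.List.sorted_pairwise t pvTitleKey),
      List.filter_append]
    cases hpx : p x
    · rw [if_neg (by simp [hpx]), List.filter_cons_of_neg (by simp [hpx]), List.filter_nil,
        List.append_nil, ih]
    · rw [if_pos (by simp [hpx]), List.filter_cons_of_pos (by simp [hpx]), List.filter_nil,
        pvSorted_append_singleton, ih]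

-- ===== VERDICT (by name: the statement is the Claim_ definition above) =====
theorem sort_insights_by_priority_py_spec : Claim_equal_sort_insights_by_priority_py := by
  intro insights _
  unfold Spec_sort_insights_by_priority_py
  show sort_insights_by_priority_py insights = sort_insights_by_priority_py_alt insights
  unfold sort_insights_by_priority_py sort_insights_by_priority_py_alt
  rw [pvInitA_eq, pvFoldA]
  simp only [List.nil_append, pvKeys_mkD, List.foldl_cons, List.foldl_nil,
    pvModify_crit, pvModify_major, pvModify_warn, pvModify_info]
  simp only [pvMkD, List.map_cons, List.map_nil, pvFilter_sorted]
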